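-- pv_equiv track=rewrite | github.com/JinyangLi01/UnfairlyTreatedGroupDetection | Coding/Algorithms/NewAlgRanking_definition2_2_20211121.py | Find_closest_ancestor
-- ===== SOURCE A (Python) =====
-- def Find_closest_ancestor(string_set, st, num_att):
--     if st in string_set:
--         return True, st
--     original_st = st
--     length = len(st)
--     j = length - 1
--     i = length - 1
--     find = False
--     while True:
--         if i < 0:
--             if find:
--                 parent_str = st[j+1:]
--                 if parent_str in string_set:
--                     return True, parent_str
--                 else:
--                     return False, original_st
--             else:
--                 return False, original_st
--         if find is False and st[i] == "|":
--             i -= 1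
--             j -= 1
--             continue
--         elif find is False and st[i] != "|":
--             j = i
--             find = True
--             i -= 1
--             continue
--         elif find and st[i] != "|":
--             i -= 1
--             continue
--         else:
--             parent_str = st[:i+1] + st[j+1:]
--             if parent_str in string_set:
--                 return True, parent_str
--             else:
--                 st = parent_str
--                 j = i - 1
--                 i -= 1
--                 continue
--     return False, original_st
-- ===== SOURCE B (Python) =====
-- def Find_closest_ancestor(string_set, st, num_att):
--     if st in string_set:
--         return True, st
--     # positions of the attribute separators, computed once
--     pipes = [k for k, c in enumerate(st) if c == '|']
--     m = 0
--     for p in reversed(pipes):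
--         cand = st[:p + 1] + '|' * m
--         if cand in string_set:
--             return True, cand
--         m += 1
--     cand = '|' * len(pipes)
--     if cand in string_set:
--         return True, cand
--     return False, st
-- ===== Notes on version B (the rewrite author's own statement) =====
-- stated objective: simpler
-- what changed: Replaces A's two-pointer character scan that repeatedly rewrites the working string with a single pass that precomputes the '|' separator positions once and forms each generalized candidate directly as a slice of the original string plus a run of '|'s.
import Mathlib
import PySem

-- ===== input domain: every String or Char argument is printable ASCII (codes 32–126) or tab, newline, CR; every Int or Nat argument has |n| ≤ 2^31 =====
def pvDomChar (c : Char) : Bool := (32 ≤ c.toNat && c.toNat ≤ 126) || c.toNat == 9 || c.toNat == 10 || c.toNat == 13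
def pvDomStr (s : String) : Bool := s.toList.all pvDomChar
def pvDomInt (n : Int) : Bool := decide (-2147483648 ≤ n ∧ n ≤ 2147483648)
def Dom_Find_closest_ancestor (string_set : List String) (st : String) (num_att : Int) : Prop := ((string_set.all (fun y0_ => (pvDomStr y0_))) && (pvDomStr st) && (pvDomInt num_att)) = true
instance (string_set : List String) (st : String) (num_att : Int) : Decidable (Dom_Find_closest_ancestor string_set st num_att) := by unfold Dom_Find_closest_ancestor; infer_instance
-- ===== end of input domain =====

-- B replaces A's two-pointer scan that repeatedly rewrites the working string with one
-- precomputed list of '|' positions, each candidate built directly from the original string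
-- (objective: simpler).

-- ===== PORT A =====
-- the while-loop of A; state (st, i, j, find); i decreases every iteration.
-- the `none` arm of pyGet? is a totality guard only: whenever it is reached i is a valid
-- index (0 ≤ i < len st), so the Python never raises IndexError here.
def pvLoopA (ss : List String) (orig : String) (st : String) (i j : Int) (find : Bool) : Bool × String :=
  if _h : i < 0 then
    if find then
      let parent := PySem.Str.slice st (some (j+1)) none
      if ss.contains parent then (true, parent) else (false, orig)
    else (false, orig)
  else
    match PySem.Str.pyGet? st i with
    | none => (false, orig)
    | some c =>
      if find = false && c == '|' then pvLoopA ss orig st (i-1) (j-1) find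
      else if find = false && c != '|' then pvLoopA ss orig st (i-1) i true
      else if find && c != '|' then pvLoopA ss orig st (i-1) j find
      else
        -- parent_str = st[:i+1] + st[j+1:]  (string concatenation, exact)
        let parent := String.ofList ((PySem.Str.slice st none (some (i+1))).toList ++ (PySem.Str.slice st (some (j+1)) none).toList)
        if ss.contains parent then (true, parent)
        else pvLoopA ss orig parent (i-1) (i-1) find
termination_by (i+1).toNat
decreasing_by all_goals omega

def Find_closest_ancestor (string_set : List String) (st : String) (num_att : Int) : Bool × String :=
  if string_set.contains st then (true, st)
  else pvLoopA string_set st st (PySem.Str.len st - 1) (PySem.Str.len st - 1) false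

-- ===== PORT B =====
-- the for-loop of Source B over reversed(pipes) with counter m; after the loop m = len(pipes),
-- so the trailing candidate '|' * len(pipes) is the [] case.  '|' * m is List.replicate m '|'
-- and string concatenation is ++ on the char lists (both exact).
def pvLoopB (ss : List String) (st : String) : List Int → Nat → Bool × String
  | [], m =>
      let cand := String.ofList (List.replicate m '|')
      if ss.contains cand then (true, cand) else (false, st)
  | p :: rest, m =>
      let cand := String.ofList ((PySem.Str.slice st none (some (p+1))).toList ++ List.replicate m '|')
      if ss.contains cand then (true, cand) else pvLoopB ss st rest (m+1)

def Find_closest_ancestor_alt (string_set : List String) (st : String) (num_att : Int) : Bool × String :=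
  if string_set.contains st then (true, st)
  else
    -- pipes = [k for k, c in enumerate(st) if c == '|']
    let pipes : List Int := ((PySem.List.enumerate st.toList).filter (fun kc => kc.2 == '|')).map (fun kc => kc.1)
    pvLoopB string_set st pipes.reverse 0

-- ===== PRECONDITION & SPEC =====
def Spec_Find_closest_ancestor (string_set : List String) (st : String) (num_att : Int) (out : Bool × String) : Prop := out = Find_closest_ancestor_alt string_set st num_att
instance (string_set : List String) (st : String) (num_att : Int) (out : Bool × String) : Decidable (Spec_Find_closest_ancestor string_set st num_att out) := by unfold Spec_Find_closest_ancestor; infer_instance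

-- ===== CLAIM (what is proved, stated in full; the proofs are below) =====
def Claim_equal_Find_closest_ancestor : Prop := ∀ (string_set : List String) (st : String) (num_att : Int), Dom_Find_closest_ancestor string_set st num_att → Spec_Find_closest_ancestor string_set st num_att (Find_closest_ancestor string_set st num_att)

-- ===== LEMMAS AND PROOFS =====

-- ascending '|'-positions of xs that are < k, as Python ints
def pipesUpTo (xs : List Char) (k : Nat) : List Int :=
  ((List.range k).filter (fun p => xs.getD p ' ' == '|')).map (fun p => ((p : Nat) : Int))

lemma pipesUpTo_succ_pipe (xs : List Char) (k : Nat) (h : xs.getD k ' ' = '|') :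
    pipesUpTo xs (k+1) = pipesUpTo xs k ++ [(k : Int)] := by
  simp only [List.getD] at h
  simp [pipesUpTo, List.range_succ, List.filter_append, List.getD, h]

lemma pipesUpTo_succ_notpipe (xs : List Char) (k : Nat) (h : ¬ xs.getD k ' ' = '|') :
    pipesUpTo xs (k+1) = pipesUpTo xs k := by
  simp only [List.getD] at h
  simp [pipesUpTo, List.range_succ, List.filter_append, List.getD, h]

lemma pipesUpTo_zero (xs : List Char) : pipesUpTo xs 0 = [] := by simp [pipesUpTo]

lemma enum_eq (xs : List Char) : ∀ (i : Int),
    PySem.List.enumerate xs i = (List.range xs.length).map (fun (k : Nat) => (i + (k : Int), xs.getD k ' ')) := by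
  induction xs with
  | nil => intro i; simp [PySem.List.enumerate]
  | cons x xs ih =>
      intro i
      rw [PySem.List.enumerate]
      simp only [ih (i+1), List.length_cons, List.range_succ_eq_map, List.map_cons, List.map_map]
      refine List.cons_eq_cons.mpr ⟨by simp, ?_⟩
      apply List.map_congr_left; intro k hk
      simp only [Function.comp_apply, List.getD_cons_succ]
      simp only [Prod.mk.injEq, Nat.succ_eq_add_one]
      refine ⟨by push_cast; ring, by simp⟩

lemma enumerate_filter_pipes (xs : List Char) :
    ((PySem.List.enumerate xs).filter (fun kc => kc.2 == '|')).map (fun kc => kc.1)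
      = pipesUpTo xs xs.length := by
  rw [enum_eq xs 0, List.filter_map, List.map_map, pipesUpTo]
  have h1 : ((fun (kc : Int × Char) => kc.2 == '|') ∘ fun (k : Nat) => ((0:Int) + (k:Int), xs.getD k ' '))
      = fun (k : Nat) => xs.getD k ' ' == '|' := by funext k; simp
  have h2 : ((fun (kc : Int × Char) => kc.1) ∘ fun (k : Nat) => ((0:Int) + (k:Int), xs.getD k ' '))
      = fun (k : Nat) => ((k : Nat) : Int) := by funext k; simp
  rw [h1, h2]

lemma toList_slice_from (s : String) {a : Int} (h : 0 ≤ a) :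
    (PySem.Str.slice s (some a) none).toList = s.toList.drop a.toNat := by
  simp [PySem.List.slice_from _ h]

lemma toList_slice_to (s : String) {b : Int} (h : 0 ≤ b) :
    (PySem.Str.slice s none (some b)).toList = s.toList.take b.toNat := by
  simp [PySem.List.slice_to _ h]

-- phase 2 of A's loop (find = true): st is the original's first (j+1) chars followed by t pipes,
-- positions i+1..j of the original are not pipes; A from here on agrees with B's loop on the
-- remaining (descending) pipe positions ≤ i with counter t.
lemma phase2 (ss : List String) (orig : String) :
    ∀ (k : Nat) (i j : Int) (st : String) (t : Nat),
      k = (i+1).toNat →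
      i ≤ j → -1 ≤ j → j < (orig.toList.length : Int) →
      st.toList = orig.toList.take (j+1).toNat ++ List.replicate t '|' →
      (∀ p : Nat, i < (p : Int) → (p : Int) ≤ j → ¬ orig.toList.getD p ' ' = '|') →
      pvLoopA ss orig st i j true = pvLoopB ss orig (pipesUpTo orig.toList (i+1).toNat).reverse t := by
  intro k
  induction k using Nat.strong_induction_on with
  | _ k IH =>
  intro i j st t hk hij hj1 hj hst hmid
  have htklen : (orig.toList.take (j+1).toNat).length = (j+1).toNat := by
    rw [List.length_take]; omega
  by_cases hi : i < 0
  · have hi1 : (i+1).toNat = 0 := by omega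
    have hpar : (PySem.Str.slice st (some (j+1)) none).toList = List.replicate t '|' := by
      rw [toList_slice_from st (by omega), hst, List.drop_left' htklen]
    have hpar' : PySem.Str.slice st (some (j+1)) none = String.ofList (List.replicate t '|') :=
      String.toList_inj.mp (by rw [hpar, String.toList_ofList])
    rw [pvLoopA, dif_pos hi, hi1, pipesUpTo_zero]
    simp only [List.reverse_nil]
    rw [pvLoopB]
    rw [if_pos trivial, hpar']
  · have hi0 : 0 ≤ i := by omega
    have hiT : i.toNat < (j + 1).toNat := by omega
    have hilen : i.toNat < orig.toList.length := by omega
    have hgetst : st.toList[i.toNat]? = some (orig.toList.getD i.toNat ' ') := by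
      rw [hst, List.getElem?_append_left (by omega), List.getElem?_take]
      simp [hiT, List.getD, List.getElem?_eq_getElem hilen]
    have hget : PySem.Str.pyGet? st i = some (orig.toList.getD i.toNat ' ') := by
      rw [PySem.Str.pyGet?_eq, PySem.Chars.pyGet?_eq_listPyGet?,
        PySem.List.pyGet?_of_nonneg _ hi0, hgetst]
    have hi1 : (i+1).toNat = i.toNat + 1 := by omega
    have hii : ((i-1)+1).toNat = i.toNat := by omega
    rw [pvLoopA, dif_neg hi, hget]
    dsimp only
    by_cases hpipe : orig.toList.getD i.toNat ' ' = '|'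
    · -- candidate branch
      have hpipe2 : orig.toList[i.toNat]?.getD ' ' = '|' := by simpa [List.getD] using hpipe
      have hcand : (PySem.Str.slice st none (some (i+1))).toList ++ (PySem.Str.slice st (some (j+1)) none).toList
          = (PySem.Str.slice orig none (some ((i.toNat : Int)+1))).toList ++ List.replicate t '|' := by
        rw [toList_slice_to st (by omega), toList_slice_from st (by omega),
          toList_slice_to orig (by omega), hst, List.drop_left' htklen,
          List.take_append_of_le_length (by omega), List.take_take]
        congr 2
        omega
      rw [hi1, pipesUpTo_succ_pipe _ _ hpipe]
      simp only [List.reverse_append, List.reverse_singleton, List.singleton_append]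
      rw [if_neg (by simp), if_neg (by simp), if_neg (by simp [hpipe2]), pvLoopB]
      rw [hcand]
      have hpipe' : orig.toList[i.toNat] = '|' := by
        have := hpipe; rwa [List.getD_eq_getElem _ _ hilen] at this
      by_cases hmem : ss.contains (String.ofList ((PySem.Str.slice orig none (some ((i.toNat : Int)+1))).toList ++ List.replicate t '|')) = true
      · rw [if_pos hmem, if_pos hmem]
      · rw [if_neg hmem, if_neg hmem]
        have hstep : (String.ofList ((PySem.Str.slice orig none (some ((i.toNat : Int)+1))).toList ++ List.replicate t '|')).toList
            = orig.toList.take ((i-1)+1).toNat ++ List.replicate (t+1) '|' := by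
          rw [String.toList_ofList, toList_slice_to orig (by omega)]
          have h1 : ((i.toNat : Int)+1).toNat = i.toNat + 1 := by omega
          rw [h1, hii, List.take_add_one, List.getElem?_eq_getElem hilen]
          simp [hpipe', List.replicate_succ]
        have := IH i.toNat (by omega) (i-1) (i-1) _ (t+1) hii.symm le_rfl (by omega) (by omega)
          hstep (by intro p h1 h2; omega)
        rw [this, hii]
    · -- scan over a non-pipe position
      have hpipe2n : ¬ orig.toList[i.toNat]?.getD ' ' = '|' := by simpa [List.getD] using hpipe
      rw [if_neg (by simp), if_neg (by simp), if_pos (by simp [hpipe2n])]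
      rw [hi1, pipesUpTo_succ_notpipe _ _ hpipe]
      have := IH ((i-1)+1).toNat (by omega) (i-1) j st t rfl (by omega) hj1 hj hst
        (by intro p h1 h2
            by_cases hpi : (p : Int) = i
            · have hpn : p = i.toNat := by omega
              rwa [hpn]
            · exact hmid p (by omega) h2)
      rw [this, hii]

-- phase 1 of A's loop (find = false, st = orig, i = j): every position > i of the original
-- is a pipe; A from here agrees with B's loop on the pipes ≤ i after B has consumed the
-- trailing pipes (whose candidates all equal orig, which is not in ss).
lemma phase1 (ss : List String) (orig : String) (hno : ss.contains orig = false) :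
    ∀ (k : Nat) (i : Int),
      k = (i+1).toNat →
      i < (orig.toList.length : Int) →
      (∀ p : Nat, i < (p : Int) → p < orig.toList.length → orig.toList.getD p ' ' = '|') →
      pvLoopA ss orig orig i i false
        = pvLoopB ss orig (pipesUpTo orig.toList (i+1).toNat).reverse
            (orig.toList.length - (i+1).toNat) := by
  intro k
  induction k using Nat.strong_induction_on with
  | _ k IH =>
  intro i hk hi htrail
  have hdroprep : orig.toList.drop (i+1).toNat = List.replicate (orig.toList.length - (i+1).toNat) '|' := by
    apply List.eq_replicate_iff.mpr
    refine ⟨by simp, ?_⟩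
    intro b hb
    obtain ⟨q, hq, hbq⟩ := List.getElem_of_mem hb
    rw [List.getElem_drop] at hbq
    have hql : (i+1).toNat + q < orig.toList.length := by
      simp only [List.length_drop] at hq; omega
    have h := htrail ((i+1).toNat + q) (by omega) hql
    rw [List.getD_eq_getElem _ _ hql] at h
    rw [← hbq]; exact h
  by_cases hi0 : i < 0
  · have h0 : (i+1).toNat = 0 := by omega
    have hall : orig.toList = List.replicate orig.toList.length '|' := by
      have h := hdroprep; rw [h0] at h; simpa using h
    have hcand : String.ofList (List.replicate (orig.toList.length - 0) '|') = orig := by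
      apply String.toList_inj.mp
      rw [String.toList_ofList, Nat.sub_zero]
      exact hall.symm
    rw [pvLoopA, dif_pos hi0, h0, pipesUpTo_zero]
    simp only [List.reverse_nil]
    rw [pvLoopB]
    rw [if_neg (by simp), hcand, if_neg (show ¬ (ss.contains orig = true) by rw [hno]; simp)]
  · have hip : 0 ≤ i := by omega
    have hilen : i.toNat < orig.toList.length := by omega
    have hi1 : (i+1).toNat = i.toNat + 1 := by omega
    have hii : ((i-1)+1).toNat = i.toNat := by omega
    have hget : PySem.Str.pyGet? orig i = some (orig.toList.getD i.toNat ' ') := by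
      rw [PySem.Str.pyGet?_eq, PySem.Chars.pyGet?_eq_listPyGet?,
        PySem.List.pyGet?_of_nonneg _ hip]
      simp [List.getD, List.getElem?_eq_getElem hilen]
    rw [pvLoopA, dif_neg hi0, hget]
    dsimp only
    by_cases hpipe : orig.toList.getD i.toNat ' ' = '|'
    · -- skip a trailing pipe; B's candidate here is orig itself, not in ss
      have hpipe2 : orig.toList[i.toNat]?.getD ' ' = '|' := by simpa [List.getD] using hpipe
      have hcand : String.ofList ((PySem.Str.slice orig none (some ((i.toNat : Int)+1))).toList
          ++ List.replicate (orig.toList.length - (i.toNat + 1)) '|') = orig := by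
        apply String.toList_inj.mp
        rw [String.toList_ofList, toList_slice_to orig (by omega)]
        have h1 : ((i.toNat : Int)+1).toNat = i.toNat + 1 := by omega
        rw [h1]
        have h := hdroprep
        rw [hi1] at h
        rw [← h, List.take_append_drop]
      rw [if_pos (by simp [hpipe2]), hi1, pipesUpTo_succ_pipe _ _ hpipe]
      simp only [List.reverse_append, List.reverse_singleton, List.singleton_append]
      rw [pvLoopB]
      rw [hcand, if_neg (show ¬ (ss.contains orig = true) by rw [hno]; simp)]
      have := IH ((i-1)+1).toNat (by omega) (i-1) rfl (by omega)
        (by intro p h1 h2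
            by_cases hpi : (p : Int) = i
            · have hpn : p = i.toNat := by omega
              rw [hpn]; exact hpipe
            · exact htrail p (by omega) h2)
      rw [this, hii]
      congr 1
      omega
    · -- first non-pipe from the right: switch to find = true
      have hpipe2n : ¬ orig.toList[i.toNat]?.getD ' ' = '|' := by simpa [List.getD] using hpipe
      rw [if_neg (by simp [hpipe2n]), if_pos (by simp [hpipe2n])]
      have := phase2 ss orig ((i-1)+1).toNat (i-1) i orig (orig.toList.length - (i+1).toNat)
        rfl (by omega) (by omega) (by omega)
        (by rw [← hdroprep, List.take_append_drop])
        (by intro p h1 h2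
            by_cases hpi : (p : Int) = i
            · have hpn : p = i.toNat := by omega
              rw [hpn]; exact hpipe
            · omega)
      rw [this, hii, hi1, pipesUpTo_succ_notpipe _ _ hpipe]

-- ===== VERDICT (by name: the statement is the Claim_ definition above) =====
theorem Find_closest_ancestor_spec : Claim_equal_Find_closest_ancestor := by
  intro ss st num_att _hdom
  unfold Spec_Find_closest_ancestor Find_closest_ancestor Find_closest_ancestor_alt
  by_cases hin : ss.contains st = true
  · rw [if_pos hin, if_pos hin]
  · rw [if_neg hin, if_neg hin]
    have hlen : PySem.Str.len st = (st.toList.length : Int) := by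
      simp [PySem.Str.len_eq]
    have h1 : (PySem.Str.len st - 1 + 1).toNat = st.toList.length := by
      rw [hlen]; omega
    have := phase1 ss st (by simpa using hin) (PySem.Str.len st - 1 + 1).toNat
      (PySem.Str.len st - 1) rfl (by rw [hlen]; omega)
      (by intro p hp hpl; rw [hlen] at hp; omega)
    rw [this, h1]
    dsimp only
    rw [enumerate_filter_pipes]
    congr 1
    omega
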